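-- pv_equiv track=rewrite | github.com/qvizt/HackerRank-Solutions-Java | Python/Algorithms/Implementation/Lisas Workbook.py | count_special_problems
-- ===== SOURCE A (Python) =====
-- def count_special_problems(workbook, problems_per_page):
--     count = 0
--     page = 1
--
--     for problems_per_chapter in workbook:
--         # pages contains the information how many pages are required
--         # for the current chapter. The sum of pages[0] and pages[1]
--         # is the required amount of pages for a chapter.
--         pages = divmod(problems_per_chapter, problems_per_page)
--
--         start_problem_on_page = 1
--         for i in range(pages[0]):
--             if page in range(start_problem_on_page, start_problem_on_page + problems_per_page):
--                 count += 1
--             page += 1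
--             start_problem_on_page += problems_per_page
--
--         if pages[1]:
--             if page in range(start_problem_on_page, start_problem_on_page + pages[1]):
--                 count += 1
--             page += 1
--
--     return count
-- ===== SOURCE B (Python) =====
-- def count_special_problems(workbook, problems_per_page):
--     # Closed form per chapter: O(number of chapters) instead of O(total pages).
--     k = problems_per_page
--     count = 0
--     page = 1
--     for n in workbook:
--         q, r = divmod(n, k)
--         t = q if q > 0 else 0          # number of iterations of A's full-page loop
--         if t > 0 and k >= 1:
--             # page i (0-based) is special iff i*k+1 <= page+i <= i*k+k,
--             # i.e. page-k <= i*(k-1) <= page-1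
--             if k == 1:
--                 if page == 1:
--                     count += t
--             else:
--                 lo = -((k - page) // (k - 1))   # ceil((page-k)/(k-1))
--                 hi = (page - 1) // (k - 1)
--                 lo = lo if lo > 0 else 0
--                 hi = hi if hi < t - 1 else t - 1
--                 if lo <= hi:
--                     count += hi - lo + 1
--         page += t
--         if r:
--             if r > 0 and t * k + 1 <= page <= t * k + r:
--                 count += 1
--             page += 1
--     return count
-- ===== Notes on version B (the rewrite author's own statement) =====
-- stated objective: faster
-- what changed: Instead of iterating over every page of every chapter, B computes per chapter the set of special full pages by solving the inequality page-k <= i*(k-1) <= page-1 in closed form with floor/ceil division (plus one direct check for the partial last page), dropping the cost from O(total pages) to O(number of chapters).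
import Mathlib
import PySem

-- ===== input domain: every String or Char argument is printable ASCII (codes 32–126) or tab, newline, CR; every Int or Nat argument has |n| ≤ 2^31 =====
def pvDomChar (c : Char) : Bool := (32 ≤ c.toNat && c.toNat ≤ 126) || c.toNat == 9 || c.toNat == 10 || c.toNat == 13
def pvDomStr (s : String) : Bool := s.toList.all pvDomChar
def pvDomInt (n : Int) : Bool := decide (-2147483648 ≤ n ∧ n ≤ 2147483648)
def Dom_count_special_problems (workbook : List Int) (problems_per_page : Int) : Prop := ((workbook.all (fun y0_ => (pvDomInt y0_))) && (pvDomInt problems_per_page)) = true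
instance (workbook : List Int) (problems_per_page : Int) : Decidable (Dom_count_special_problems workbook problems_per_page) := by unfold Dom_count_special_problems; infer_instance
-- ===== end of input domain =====

-- B replaces A's page-by-page scan with a per-chapter closed form (solving the special-page
-- inequality with floor/ceil division), dropping the cost from O(total pages) to O(chapters).

-- ===== PORT A =====
-- inner page loop body: state (count, page, start_problem_on_page)
def pvA_inner (k : Int) (s : Int × Int × Int) (_i : Int) : Int × Int × Int :=
  (if s.2.2 ≤ s.2.1 ∧ s.2.1 < s.2.2 + k then s.1 + 1 else s.1, s.2.1 + 1, s.2.2 + k)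

-- one chapter of A's outer loop; divmod raises ZeroDivisionError for k = 0 (excluded by Pre_),
-- so the `.getD (0, 0)` default is never read on admitted inputs
def pvA_chapter (k : Int) (st : Int × Int) (n : Int) : Int × Int :=
  let pages := (PySem.Int.divmod? n k).getD (0, 0)
  let s := (PySem.List.pyRange 0 pages.1 1).foldl (pvA_inner k) (st.1, st.2, 1)
  if pages.2 ≠ 0 then
    (if s.2.2 ≤ s.2.1 ∧ s.2.1 < s.2.2 + pages.2 then s.1 + 1 else s.1, s.2.1 + 1)
  else (s.1, s.2.1)

def count_special_problems (workbook : List Int) (problems_per_page : Int) : Int :=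
  (workbook.foldl (pvA_chapter problems_per_page) (0, 1)).1

-- ===== PORT B =====
-- one chapter of B's loop, in closed form; state (count, page)
def pvB_chapter (k : Int) (st : Int × Int) (n : Int) : Int × Int :=
  let q := PySem.Int.floordiv n k
  let r := PySem.Int.mod n k
  let t := if q > 0 then q else 0
  let count :=
    if t > 0 ∧ k ≥ 1 then
      if k = 1 then (if st.2 = 1 then st.1 + t else st.1)
      else
        let lo0 := -(PySem.Int.floordiv (k - st.2) (k - 1))
        let hi0 := PySem.Int.floordiv (st.2 - 1) (k - 1)
        let lo := if lo0 > 0 then lo0 else 0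
        let hi := if hi0 < t - 1 then hi0 else t - 1
        if lo ≤ hi then st.1 + (hi - lo + 1) else st.1
    else st.1
  let page := st.2 + t
  let count := if r ≠ 0 then (if r > 0 ∧ t * k + 1 ≤ page ∧ page ≤ t * k + r then count + 1 else count) else count
  let page := if r ≠ 0 then page + 1 else page
  (count, page)

def count_special_problems_alt (workbook : List Int) (problems_per_page : Int) : Int :=
  (workbook.foldl (pvB_chapter problems_per_page) (0, 1)).1

-- ===== PRECONDITION & SPEC =====
-- A raises ZeroDivisionError (divmod by zero) iff problems_per_page = 0 and workbook is
-- nonempty (an empty workbook never reaches divmod); exactly those inputs are excluded.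
def Pre_count_special_problems (workbook : List Int) (problems_per_page : Int) : Prop :=
  workbook = [] ∨ problems_per_page ≠ 0
instance (workbook : List Int) (problems_per_page : Int) : Decidable (Pre_count_special_problems workbook problems_per_page) := by unfold Pre_count_special_problems; infer_instance

def pvWitness_count_special_problems : List Int × Int := ([4, 2], 4)

def Spec_count_special_problems (workbook : List Int) (problems_per_page : Int) (out : Int) : Prop := out = count_special_problems_alt workbook problems_per_page
instance (workbook : List Int) (problems_per_page : Int) (out : Int) : Decidable (Spec_count_special_problems workbook problems_per_page out) := by unfold Spec_count_special_problems; infer_instance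

-- ===== CLAIM (what is proved, stated in full; the proofs are below) =====
def Claim_equal_count_special_problems : Prop := ∀ (workbook : List Int) (problems_per_page : Int), Dom_count_special_problems workbook problems_per_page → Pre_count_special_problems workbook problems_per_page → Spec_count_special_problems workbook problems_per_page (count_special_problems workbook problems_per_page)

-- ===== LEMMAS AND PROOFS =====

-- running count of A's inner loop: after t pages starting at (page, start) = (p, s)
def pvHcnt (k p s : Int) : Nat → Int
  | 0 => 0
  | (t+1) => (if s ≤ p ∧ p < s + k then 1 else 0) + pvHcnt k (p+1) (s+k) t

theorem pv_fold_inner (k : Int) : ∀ (l : List Int) (c p s : Int),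
    l.foldl (pvA_inner k) (c, p, s) =
      (c + pvHcnt k p s l.length, p + l.length, s + l.length * k) := by
  intro l
  induction l with
  | nil => intro c p s; simp [pvHcnt]
  | cons x l ih =>
    intro c p s
    simp only [List.foldl_cons, pvA_inner]
    rw [ih]
    simp only [pvHcnt, List.length_cons, Prod.mk.injEq]
    push_cast
    refine ⟨?_, by ring, by ring⟩
    split_ifs <;> ring

theorem pvHcnt_succ_right (k : Int) : ∀ (t : Nat) (p s : Int),
    pvHcnt k p s (t+1) =
      pvHcnt k p s t + (if s + t * k ≤ p + t ∧ p + t < s + t * k + k then 1 else 0) := by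
  intro t
  induction t with
  | zero => intro p s; simp [pvHcnt]
  | succ t ih =>
    intro p s
    have h1 : s + k + (t : Int) * k = s + ((t : Int) + 1) * k := by ring
    have h2 : p + 1 + (t : Int) = p + ((t : Int) + 1) := by ring
    calc pvHcnt k p s (t+2)
        = (if s ≤ p ∧ p < s + k then 1 else 0) + pvHcnt k (p+1) (s+k) (t+1) := rfl
      _ = (if s ≤ p ∧ p < s + k then 1 else 0) + (pvHcnt k (p+1) (s+k) t +
            (if s + k + t * k ≤ p + 1 + t ∧ p + 1 + t < s + k + t * k + k then 1 else 0)) := by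
            rw [ih]
      _ = pvHcnt k p s (t+1) + (if s + k + t * k ≤ p + 1 + t ∧ p + 1 + t < s + k + t * k + k then 1 else 0) := by
            simp only [pvHcnt]; ring
      _ = _ := by rw [h1, h2]; push_cast; ring_nf

theorem pvHcnt_k_nonpos (k : Int) (hk : k ≤ 0) : ∀ (t : Nat) (p s : Int), pvHcnt k p s t = 0 := by
  intro t
  induction t with
  | zero => intro p s; rfl
  | succ t ih =>
    intro p s
    simp only [pvHcnt, ih]
    split_ifs with h
    · exact absurd h (by omega)
    · ring

theorem pvHcnt_k_one (p : Int) : ∀ t : Nat, pvHcnt 1 p 1 t = if p = 1 then (t : Int) else 0 := by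
  intro t
  induction t with
  | zero => simp [pvHcnt]
  | succ t ih =>
    rw [pvHcnt_succ_right, ih]
    split_ifs <;> push_cast <;> omega

theorem pvHcnt_k_ge2 (k p : Int) (hk : 2 ≤ k) : ∀ t : Nat,
    pvHcnt k p 1 t =
      (if max (-(PySem.Int.floordiv (k - p) (k - 1))) 0 ≤
          min (PySem.Int.floordiv (p - 1) (k - 1)) ((t : Int) - 1) then
        min (PySem.Int.floordiv (p - 1) (k - 1)) ((t : Int) - 1) -
          max (-(PySem.Int.floordiv (k - p) (k - 1))) 0 + 1
       else 0) := by
  have hb : (0 : Int) < k - 1 := by omega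
  have hHh : ∀ j : Int, j ≤ PySem.Int.floordiv (p - 1) (k - 1) ↔ j * (k - 1) ≤ p - 1 :=
    fun j => PySem.Int.le_floordiv_iff_mul_le hb
  have hL : ∀ j : Int, -(PySem.Int.floordiv (k - p) (k - 1)) ≤ j ↔ p - k ≤ j * (k - 1) := by
    intro j
    have := PySem.Int.le_floordiv_iff_mul_le (a := k - p) (q := -j) hb
    have hr : (-j) * (k - 1) = -(j * (k - 1)) := by ring
    constructor <;> intro h
    · have : -j ≤ PySem.Int.floordiv (k - p) (k - 1) := by omega
      have := this.trans_eq rfl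
      have h2 := (PySem.Int.le_floordiv_iff_mul_le hb).mp this
      omega
    · have h2 : (-j) * (k - 1) ≤ k - p := by omega
      have := (PySem.Int.le_floordiv_iff_mul_le hb).mpr h2
      omega
  intro t
  induction t with
  | zero =>
    simp only [pvHcnt, Nat.cast_zero]
    split_ifs with h
    · exact absurd h (by omega)
    · rfl
  | succ t ih =>
    rw [pvHcnt_succ_right, ih]
    have hmul : (t : Int) * k = (t : Int) * (k - 1) + t := by ring
    have hcond : (1 + (t : Int) * k ≤ p + t ∧ p + t < 1 + (t : Int) * k + k) ↔
        (-(PySem.Int.floordiv (k - p) (k - 1)) ≤ (t : Int) ∧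
          (t : Int) ≤ PySem.Int.floordiv (p - 1) (k - 1)) := by
      rw [hL, hHh]; omega
    rw [if_congr hcond rfl rfl]
    split_ifs <;> push_cast <;> omega

set_option maxHeartbeats 2000000 in
theorem pv_chapter_eq (k : Int) (hk : k ≠ 0) (st : Int × Int) (n : Int) :
    pvA_chapter k st n = pvB_chapter k st n := by
  obtain ⟨c, p⟩ := st
  simp only [pvA_chapter, pvB_chapter]
  rw [show PySem.Int.divmod? n k = some (PySem.Int.floordiv n k, PySem.Int.mod n k) from by
    simp [PySem.Int.divmod?, PySem.Int.floordiv, PySem.Int.mod, hk]]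
  simp only [Option.getD_some]
  rw [PySem.List.pyRange_one, pv_fold_inner]
  simp only [List.length_map, List.length_range]
  set q := PySem.Int.floordiv n k with hq
  set r := PySem.Int.mod n k with hr
  clear_value q r
  have hT : ((q - 0).toNat : Int) = if q > 0 then q else 0 := by split <;> omega
  by_cases hk1 : k = 1
  · subst hk1
    have hrb : 0 ≤ r ∧ r < 1 := by rw [hr]; exact ⟨PySem.Int.mod_nonneg n (by omega), PySem.Int.mod_lt n (by omega)⟩
    rw [pvHcnt_k_one, hT]; clear hT
    split_ifs <;> simp only [Prod.mk.injEq, and_true] <;> omega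
  · by_cases hk2 : 2 ≤ k
    · rw [pvHcnt_k_ge2 k p hk2, hT]; clear hT
      split_ifs <;> simp only [Prod.mk.injEq, and_true] <;> omega
    · have hrb : k < r ∧ r ≤ 0 := by rw [hr]; exact PySem.Int.mod_neg_bounds n (by omega)
      rw [pvHcnt_k_nonpos k (by omega), hT]; clear hT
      split_ifs <;> simp only [Prod.mk.injEq, and_true] <;> omega

theorem pv_fold_eq (k : Int) (hk : k ≠ 0) (l : List Int) (st : Int × Int) :
    l.foldl (pvA_chapter k) st = l.foldl (pvB_chapter k) st :=
  PySem.List.foldl_congr_mem l (pvA_chapter k) (pvB_chapter k) st (fun acc x _ => pv_chapter_eq k hk acc x)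

-- ===== VERDICT (by name: the statement is the Claim_ definition above) =====
theorem count_special_problems_spec : Claim_equal_count_special_problems := by
  intro workbook k _hdom hpre
  unfold Spec_count_special_problems count_special_problems count_special_problems_alt
  rcases hpre with hnil | hk
  · subst hnil; rfl
  · rw [pv_fold_eq k hk]
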